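-- pv_equiv track=rewrite | github.com/Kasiet2001/leetcode | rearrange_k_substrings_to_form_target_string.py | isPossibleToRearrange
-- ===== SOURCE A (Python) =====
-- def isPossibleToRearrange(s, t, k):
--     if len(s) % k != 0:
--         return False
--     m = len(s) // k
--     freq1 = {}
--     freq2 = []
--     for i in range(0, len(s) - m + 1, m):
--         freq1[s[i: i + m]] = freq1.get(s[i: i + m], 0) + 1
--         freq2.extend([t[i: i + m]])
--     for n in freq2:
--         if n not in freq1 or freq1[n] == 0:
--             return False
--         freq1[n] -= 1
--     return True
-- ===== SOURCE B (Python) =====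
-- def isPossibleToRearrange(s, t, k):
--     if len(s) % k != 0:
--         return False
--     m = len(s) // k
--     idxs = range(0, len(s) - m + 1, m)
--     return sorted(s[i:i + m] for i in idxs) == sorted(t[i:i + m] for i in idxs)
-- ===== Notes on version B (the rewrite author's own statement) =====
-- stated objective: simpler
-- what changed: B replaces A's frequency-dict build plus decrement-and-early-return loop with slicing both strings over the same index range and comparing the two block lists after sorting.
import Mathlib
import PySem

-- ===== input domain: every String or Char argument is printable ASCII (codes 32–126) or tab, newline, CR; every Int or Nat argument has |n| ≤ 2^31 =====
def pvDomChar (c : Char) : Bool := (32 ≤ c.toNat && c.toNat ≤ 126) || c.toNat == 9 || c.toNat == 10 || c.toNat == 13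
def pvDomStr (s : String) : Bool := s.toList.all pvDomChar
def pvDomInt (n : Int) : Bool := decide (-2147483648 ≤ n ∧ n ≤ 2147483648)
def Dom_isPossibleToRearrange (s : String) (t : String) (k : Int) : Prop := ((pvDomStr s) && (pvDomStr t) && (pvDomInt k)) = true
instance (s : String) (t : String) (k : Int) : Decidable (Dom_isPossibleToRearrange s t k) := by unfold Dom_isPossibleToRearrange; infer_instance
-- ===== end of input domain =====

-- B replaces A's frequency-dict-plus-decrement loop with sort-the-blocks-and-compare; same return value on Pre_ (k ≠ 0 and s nonempty, where the Python A returns).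


-- ===== PORT A =====
-- A's second loop: 'for n in freq2: if n not in freq1 or freq1[n] == 0: return False; freq1[n] -= 1'
def checkLoop (d : PySem.Dict String Int) : List String → Bool
  | [] => true
  | n :: rest =>
      if (!(d.contains n)) || (d.getD n 0 == 0) then false
      else checkLoop (d.modify n 0 (· - 1)) rest

def isPossibleToRearrange (s : String) (t : String) (k : Int) : Bool :=
  if PySem.Int.mod (PySem.Str.len s) k ≠ 0 then false
  else
    let m := PySem.Int.floordiv (PySem.Str.len s) k
    let p := (PySem.List.pyRange 0 (PySem.Str.len s - m + 1) m).foldl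
      (fun (p : PySem.Dict String Int × List String) i =>
        (p.1.insert (PySem.Str.slice s (some i) (some (i + m)))
              (p.1.getD (PySem.Str.slice s (some i) (some (i + m))) 0 + 1),
         p.2 ++ [PySem.Str.slice t (some i) (some (i + m))]))
      (PySem.Dict.empty, [])
    checkLoop p.1 p.2

-- ===== PORT B =====
def isPossibleToRearrange_alt (s : String) (t : String) (k : Int) : Bool :=
  if PySem.Int.mod (PySem.Str.len s) k ≠ 0 then false
  else
    let m := PySem.Int.floordiv (PySem.Str.len s) k
    let idxs := PySem.List.pyRange 0 (PySem.Str.len s - m + 1) m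
    decide (PySem.List.sorted (idxs.map (fun i => PySem.Str.slice s (some i) (some (i + m)))) (fun x => x) false
          = PySem.List.sorted (idxs.map (fun i => PySem.Str.slice t (some i) (some (i + m)))) (fun x => x) false)

-- ===== PRECONDITION & SPEC =====
-- Python A raises outside Pre_: ZeroDivisionError at k = 0, and for empty s a range() with step 0 (ValueError); B raises there too.
def Pre_isPossibleToRearrange (s : String) (t : String) (k : Int) : Prop := k ≠ 0 ∧ s ≠ ""
instance (s : String) (t : String) (k : Int) : Decidable (Pre_isPossibleToRearrange s t k) := by unfold Pre_isPossibleToRearrange; infer_instance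

def pvWitness_isPossibleToRearrange : String × String × Int := ("abab", "baba", 2)

def Spec_isPossibleToRearrange (s : String) (t : String) (k : Int) (out : Bool) : Prop := out = isPossibleToRearrange_alt s t k
instance (s : String) (t : String) (k : Int) (out : Bool) : Decidable (Spec_isPossibleToRearrange s t k out) := by unfold Spec_isPossibleToRearrange; infer_instance

-- ===== CLAIM (what is proved, stated in full; the proofs are below) =====
def Claim_equal_isPossibleToRearrange : Prop := ∀ (s : String) (t : String) (k : Int), Dom_isPossibleToRearrange s t k → Pre_isPossibleToRearrange s t k → Spec_isPossibleToRearrange s t k (isPossibleToRearrange s t k)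

-- ===== LEMMAS AND PROOFS =====

-- abstraction of checkLoop over the multiplicity function a dict realises
def countRun (c : String → Int) : List String → Bool
  | [] => true
  | n :: rest => if c n = 0 then false else countRun (fun v => if v = n then c v - 1 else c v) rest

theorem countRun_congr (c c' : String → Int) (bs : List String) (h : ∀ v, c v = c' v) :
    countRun c bs = countRun c' bs := by
  induction bs generalizing c c' with
  | nil => rfl
  | cons n rest ih =>
      simp only [countRun, h n]
      split
      · rfl
      · exact ih _ _ (fun v => by simp [h v])

theorem checkLoop_eq_countRun (bs : List String) (d : PySem.Dict String Int) :
    checkLoop d bs = countRun (fun v => d.getD v 0) bs := by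
  induction bs generalizing d with
  | nil => rfl
  | cons n rest ih =>
      simp only [checkLoop, countRun]
      have hcond : ((!(d.contains n)) || (d.getD n 0 == 0)) = decide (d.getD n 0 = 0) := by
        cases hc : d.contains n with
        | false => simp [PySem.Dict.getD_of_not_contains d 0 hc]
        | true => rfl
      rw [hcond]
      by_cases h0 : d.getD n 0 = 0
      · simp [h0]
      · simp only [h0, decide_false, Bool.false_eq_true, if_false]
        rw [ih]
        exact countRun_congr _ _ rest (fun v => by
          rw [PySem.Dict.getD_modify]
          by_cases hv : v = n <;> simp [hv])

theorem countRun_counts (bs as : List String) :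
    countRun (fun v => (as.count v : Int)) bs = true ↔ ∀ v, bs.count v ≤ as.count v := by
  induction bs generalizing as with
  | nil => simp [countRun]
  | cons n rest ih =>
      simp only [countRun]
      by_cases h0 : (as.count n : Int) = 0
      · have hn : as.count n = 0 := by exact_mod_cast h0
        simp only [h0, if_true]
        constructor
        · intro h; cases h
        · intro h
          have := h n
          simp [List.count_cons_self, hn] at this
      · have hn : 1 ≤ as.count n := by omega
        rw [if_neg h0]
        have hfun : countRun (fun v => if v = n then (as.count v : Int) - 1 else (as.count v : Int)) rest
            = countRun (fun v => ((as.erase n).count v : Int)) rest := by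
          apply countRun_congr
          intro v
          by_cases hv : v = n
          · subst hv
            rw [if_pos rfl, @List.count_erase_self String _ _ v as]
            omega
          · rw [if_neg hv, List.count_erase_of_ne hv]
        rw [hfun, ih]
        constructor
        · intro h v
          have hv := h v
          by_cases hvn : v = n
          · subst hvn
            rw [@List.count_erase_self String _ _ v as] at hv
            simp only [List.count_cons_self]
            omega
          · rw [List.count_erase_of_ne hvn] at hv
            simp [Ne.symm hvn]
            omega
        · intro h v
          have hv := h v
          by_cases hvn : v = n
          · subst hvn
            rw [@List.count_erase_self String _ _ v as]
            simp only [List.count_cons_self] at hv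
            omega
          · rw [List.count_erase_of_ne hvn]
            simp [Ne.symm hvn] at hv
            omega

-- the core multiset fact: A's counting check equals B's sorted-blocks comparison on equal-length block lists
theorem checkLoop_counter_eq_sorted (as bs : List String) (hlen : as.length = bs.length) :
    checkLoop (PySem.Dict.counter as) bs
      = decide (PySem.List.sorted as (fun x => x) false = PySem.List.sorted bs (fun x => x) false) := by
  rw [checkLoop_eq_countRun]
  have h1 : countRun (fun v => (PySem.Dict.counter as).getD v 0) bs
      = countRun (fun v => (as.count v : Int)) bs :=
    countRun_congr _ _ bs (fun v => PySem.Dict.getD_counter as v)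
  rw [h1, Bool.eq_iff_iff, countRun_counts]
  simp only [decide_eq_true_eq, PySem.List.sorted_id_eq_sorted_id_iff_perm]
  constructor
  · intro h
    have hsub : bs.Subperm as := List.subperm_ext_iff.mpr (fun x _ => h x)
    exact (List.Subperm.perm_of_length_le hsub (le_of_eq hlen)).symm
  · intro h v
    exact le_of_eq (h.symm.count_eq v)

-- ===== VERDICT (by name: the statement is the Claim_ definition above) =====
theorem isPossibleToRearrange_spec : Claim_equal_isPossibleToRearrange := by
  intro s t k _ _
  unfold Spec_isPossibleToRearrange isPossibleToRearrange isPossibleToRearrange_alt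
  dsimp only
  by_cases hmod : PySem.Int.mod (PySem.Str.len s) k = 0
  · rw [if_neg (not_not_intro hmod), if_neg (not_not_intro hmod)]
    rw [PySem.List.foldl_prod_mk
          (fun (d : PySem.Dict String Int) (i : Int) =>
            d.insert (PySem.Str.slice s (some i) (some (i + PySem.Int.floordiv (PySem.Str.len s) k)))
              (d.getD (PySem.Str.slice s (some i) (some (i + PySem.Int.floordiv (PySem.Str.len s) k))) 0 + 1))
          (fun (l : List String) (i : Int) =>
            l ++ [PySem.Str.slice t (some i) (some (i + PySem.Int.floordiv (PySem.Str.len s) k))])]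
    have hcnt : ∀ (l : List Int) (f : Int → String),
        l.foldl (fun (d : PySem.Dict String Int) i => d.insert (f i) (d.getD (f i) 0 + 1)) PySem.Dict.empty
          = PySem.Dict.counter (l.map f) := by
      intro l f
      rw [← PySem.Dict.foldl_insert_getD_add_one_eq_counter, List.foldl_map]
    rw [hcnt]
    rw [PySem.List.foldl_append_singleton_eq_map]
    rw [checkLoop_counter_eq_sorted]
    · simp
    · simp
  · rw [if_pos hmod, if_pos hmod]
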